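-- pv_equiv track=rewrite | github.com/catalinc/codeeval-solutions | src/python/word_chain.py | word_chain_len
-- ===== SOURCE A (Python) =====
-- def word_chain_len(words, chain):
--     next_words = next_words_in_chain(words, chain)
--     if not next_words:
--         return len(chain)
--     else:
--         max_len = 0
--         for w in next_words:
--             chain_len = word_chain_len(words, chain + [w])
--             if chain_len > max_len:
--                 max_len = chain_len
--         return max_len
--
-- def next_words_in_chain(words, chain):
--     ret = []
--     ch = chain[-1][-1]
--     for w in words:
--         if w.startswith(ch) and w not in chain:
--             ret.append(w)
--     return ret
-- ===== SOURCE B (Python) =====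
-- def word_chain_len(words, chain):
--     ch = chain[-1][-1]
--     remaining = [w for w in words if w not in chain]
--     return len(chain) + _longest_ext(remaining, ch)
--
-- def _longest_ext(remaining, ch):
--     # longest number of words that can still be appended, starting from letter ch
--     best = 0
--     for w in remaining:
--         if w.startswith(ch):
--             ext = 1 + _longest_ext([x for x in remaining if x != w], w[-1])
--             if ext > best:
--                 best = ext
--     return best
-- ===== Notes on version B (the rewrite author's own statement) =====
-- stated objective: alternative
-- what changed: B replaces A's recursion on the growing chain (which rescans the chain with 'w not in chain' at every node) by a recursion on the shrinking list of still-usable words, returning the extension count and adding len(chain) once at the top.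
import Mathlib
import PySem

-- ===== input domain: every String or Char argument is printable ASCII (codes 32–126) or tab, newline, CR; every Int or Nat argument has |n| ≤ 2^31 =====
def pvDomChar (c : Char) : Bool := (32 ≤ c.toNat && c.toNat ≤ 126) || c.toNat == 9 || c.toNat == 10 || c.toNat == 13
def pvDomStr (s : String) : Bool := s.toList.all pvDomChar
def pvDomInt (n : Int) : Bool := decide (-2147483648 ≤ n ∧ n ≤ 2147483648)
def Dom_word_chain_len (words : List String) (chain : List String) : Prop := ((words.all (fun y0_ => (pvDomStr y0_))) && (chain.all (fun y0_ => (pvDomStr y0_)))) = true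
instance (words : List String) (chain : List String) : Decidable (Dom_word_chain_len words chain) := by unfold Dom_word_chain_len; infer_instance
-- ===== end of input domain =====

-- B replaces A's recursion on the growing chain (with its 'w not in chain' scans) by a recursion on the
-- list of still-usable words, returning the extension count; objective: alternative decomposition.

-- termination helper for the ports (cited by decreasing_by)
theorem pv_filter_append_lt (words chain : List String) (w : String)
    (hw : w ∈ words) (hnc : chain.contains w = false) :
    (words.filter (fun x => !((chain ++ [w]).contains x))).length
      < (words.filter (fun x => !(chain.contains x))).length := by
  have hsub : (words.filter (fun x => !((chain ++ [w]).contains x))).Sublist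
      (words.filter (fun x => !(chain.contains x))) := by
    apply List.monotone_filter_right
    intro a ha
    simp only [List.contains_append, Bool.not_or, Bool.and_eq_true] at ha
    exact ha.1
  rcases Nat.lt_or_ge (words.filter (fun x => !((chain ++ [w]).contains x))).length
      (words.filter (fun x => !(chain.contains x))).length with h | h
  · exact h
  · exfalso
    have heq := hsub.eq_of_length (Nat.le_antisymm hsub.length_le h)
    have hwnc : w ∉ chain := by simpa using hnc
    have hmem : w ∈ words.filter (fun x => !(chain.contains x)) := by
      simp [List.mem_filter, hw, hwnc]
    rw [← heq] at hmem
    simp [List.mem_filter] at hmem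

theorem pv_filter_ne_lt (remaining : List String) (w : String) (hw : w ∈ remaining) :
    (remaining.filter (fun x => x ≠ w)).length < remaining.length := by
  have hsub : (remaining.filter (fun x => x ≠ w)).Sublist remaining := List.filter_sublist
  rcases Nat.lt_or_ge (remaining.filter (fun x => x ≠ w)).length remaining.length with h | h
  · exact h
  · exfalso
    have heq := hsub.eq_of_length (Nat.le_antisymm hsub.length_le h)
    rw [← heq] at hw
    simp [List.mem_filter] at hw

-- ===== PORT A =====
-- A's inner helper next_words_in_chain is inlined as the filter it computes; chain[-1][-1]
-- is chain's pyGet? at -1 then the string's pyGet? at -1 (none = IndexError, excluded by Pre_).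
def word_chain_len (words : List String) (chain : List String) : Int :=
  match (PySem.List.pyGet? chain (-1)).bind (fun s => PySem.Str.pyGet? s (-1)) with
  | none => 0  -- Python raises IndexError here; outside Pre_
  | some ch =>
    if words.filter (fun w => PySem.Str.startswith w (String.ofList [ch]) && !(chain.contains w)) = []
    then (chain.length : Int)
    else (words.filter (fun w => PySem.Str.startswith w (String.ofList [ch]) && !(chain.contains w))).attach.foldl (fun mx p =>
      let cl := word_chain_len words (chain ++ [p.1])
      if cl > mx then cl else mx) 0
termination_by (words.filter (fun x => !(chain.contains x))).length
decreasing_by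
  have h2 : p.1 ∈ words.filter (fun w => PySem.Str.startswith w (String.ofList [ch]) && !(chain.contains w)) := p.2
  simp only [List.mem_filter, Bool.and_eq_true, Bool.not_eq_true'] at h2
  exact pv_filter_append_lt words chain p.1 h2.1 h2.2.2

-- ===== PORT B =====
-- termination helper (cited by decreasing_by of longestExt)
theorem pv_attach_filter_len (remaining : List String) (w : String) :
    ((remaining.attach.filter (fun x : {y // y ∈ remaining} => decide (x.1 ≠ w))).unattach).length
      = (remaining.filter (fun x => x ≠ w)).length := by
  simp [← List.countP_eq_length_filter]
  exact List.countP_attach (p := fun y => !decide (y = w)) (l := remaining)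

def longestExt (remaining : List String) (ch : String) : Int :=
  remaining.attach.foldl (fun best p =>
    if PySem.Str.startswith p.1 ch then
      match PySem.Str.pyGet? p.1 (-1) with
      | none => best  -- unreachable totality guard: in Source B, w.startswith(ch) with ch a 1-char string forces w nonempty
      | some c =>
        let ext := 1 + longestExt (remaining.filter (fun x => x ≠ p.1)) (String.ofList [c])
        if ext > best then ext else best
    else best) 0
termination_by remaining.length
decreasing_by
  rw [pv_attach_filter_len]
  exact pv_filter_ne_lt remaining p.1 p.2

def word_chain_len_alt (words : List String) (chain : List String) : Int :=
  match (PySem.List.pyGet? chain (-1)).bind (fun s => PySem.Str.pyGet? s (-1)) with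
  | none => 0  -- Python raises IndexError here; outside Pre_
  | some ch =>
    (chain.length : Int) + longestExt (words.filter (fun w => !(chain.contains w))) (String.ofList [ch])

-- ===== PRECONDITION & SPEC =====
-- Pre_ excludes exactly the inputs where Python A raises IndexError on chain[-1][-1]:
-- an empty chain, or a chain whose last word is the empty string.
def Pre_word_chain_len (words : List String) (chain : List String) : Prop :=
  chain.getLast? ≠ none ∧ chain.getLast? ≠ some ""
instance (words : List String) (chain : List String) : Decidable (Pre_word_chain_len words chain) := by unfold Pre_word_chain_len; infer_instance

def pvWitness_word_chain_len : List String × List String := (["ab", "bc", "ca"], ["a"])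

def Spec_word_chain_len (words : List String) (chain : List String) (out : Int) : Prop := out = word_chain_len_alt words chain
instance (words : List String) (chain : List String) (out : Int) : Decidable (Spec_word_chain_len words chain out) := by unfold Spec_word_chain_len; infer_instance

-- ===== CLAIM (what is proved, stated in full; the proofs are below) =====
def Claim_equal_word_chain_len : Prop := ∀ (words : List String) (chain : List String), Dom_word_chain_len words chain → Pre_word_chain_len words chain → Spec_word_chain_len words chain (word_chain_len words chain)

-- ===== LEMMAS AND PROOFS =====

theorem pv_foldl_ge_init {α : Type} (f : Int → α → Int) (h : ∀ b x, b ≤ f b x) :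
    ∀ (l : List α) (init : Int), init ≤ l.foldl f init := by
  intro l
  induction l with
  | nil => intro init; simp
  | cons x xs ih => intro init; exact le_trans (h init x) (ih (f init x))

theorem longestExt_plain (remaining : List String) (ch : String) :
    longestExt remaining ch = remaining.foldl (fun best w =>
      if PySem.Str.startswith w ch then
        match PySem.Str.pyGet? w (-1) with
        | none => best
        | some c =>
          let ext := 1 + longestExt (remaining.filter (fun x => x ≠ w)) (String.ofList [c])
          if ext > best then ext else best
      else best) 0 := by
  rw [longestExt]
  exact List.foldl_attach (l := remaining) (b := 0)
    (f := fun best w =>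
      if PySem.Str.startswith w ch then
        match PySem.Str.pyGet? w (-1) with
        | none => best
        | some c =>
          let ext := 1 + longestExt (remaining.filter (fun x => x ≠ w)) (String.ofList [c])
          if ext > best then ext else best
      else best)

theorem longestExt_nonneg (remaining : List String) (ch : String) :
    0 ≤ longestExt remaining ch := by
  rw [longestExt_plain]
  apply pv_foldl_ge_init
  intro b w
  dsimp only
  split
  · cases PySem.Str.pyGet? w (-1) with
    | none => exact le_refl b
    | some c =>
      show b ≤ if 1 + longestExt (remaining.filter (fun x => x ≠ w)) (String.ofList [c]) > b
               then 1 + longestExt (remaining.filter (fun x => x ≠ w)) (String.ofList [c]) else b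
      split <;> omega
  · exact le_refl b

theorem pv_fold_shift_aux (g : String → Int) (L : Int) :
    ∀ (l : List String) (a b : Int), a = L + b →
      l.foldl (fun mx w => if L + g w > mx then L + g w else mx) a
        = L + l.foldl (fun mx w => if g w > mx then g w else mx) b := by
  intro l
  induction l with
  | nil => intro a b h; simpa using h
  | cons x xs ih =>
    intro a b h
    simp only [List.foldl_cons]
    apply ih
    subst h
    by_cases hx : g x > b
    · rw [if_pos (by omega), if_pos hx]
    · rw [if_neg (by omega), if_neg hx]

theorem pv_fold_shift (g : String → Int) (L : Int) (hL : 0 ≤ L) (l : List String) (hl : l ≠ [])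
    (hg : ∀ w ∈ l, 1 ≤ g w) :
    l.foldl (fun mx w => if L + g w > mx then L + g w else mx) 0
      = L + l.foldl (fun mx w => if g w > mx then g w else mx) 0 := by
  cases l with
  | nil => exact absurd rfl hl
  | cons x xs =>
    have h1 : 1 ≤ g x := hg x List.mem_cons_self
    simp only [List.foldl_cons]
    rw [if_pos (by omega), if_pos (by omega)]
    exact pv_fold_shift_aux g L xs _ _ rfl

theorem pv_scrut_eq (chain : List String) (s : String) (c : Char)
    (hlast : chain.getLast? = some s) (hc : s.toList.getLast? = some c) :
    (PySem.List.pyGet? chain (-1)).bind (fun t => PySem.Str.pyGet? t (-1)) = some c := by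
  rw [PySem.List.pyGet?_neg_one, hlast]
  simp [PySem.Str.pyGet?_eq, PySem.Chars.pyGet?, PySem.List.pyGet?_neg_one, hc]

theorem pv_remaining_step (words chain : List String) (w : String) :
    (words.filter (fun x => !(chain.contains x))).filter (fun x => x ≠ w)
      = words.filter (fun x => !((chain ++ [w]).contains x)) := by
  rw [List.filter_filter]
  apply List.filter_congr
  intro x _
  by_cases hxw : x = w
  · subst hxw; simp
  · simp [hxw]

theorem pv_key : ∀ (n : Nat) (words chain : List String) (s : String) (c : Char),
    (words.filter (fun x => !(chain.contains x))).length ≤ n →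
    chain.getLast? = some s → s.toList.getLast? = some c →
    word_chain_len words chain
      = (chain.length : Int)
        + longestExt (words.filter (fun x => !(chain.contains x))) (String.ofList [c]) := by
  intro n
  induction n with
  | zero =>
    intro words chain s c hlen hlast hc
    have hrem : words.filter (fun x => !(chain.contains x)) = [] := by
      cases h : words.filter (fun x => !(chain.contains x)) with
      | nil => rfl
      | cons y ys => rw [h] at hlen; simp at hlen
    rw [word_chain_len]
    simp only [pv_scrut_eq chain s c hlast hc]
    rw [List.filter_filter.symm.trans (congrArg _ hrem)]
    rw [hrem, longestExt_plain]
    simp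
  | succ n ih =>
    intro words chain s c hlen hlast hc
    rw [word_chain_len]
    simp only [pv_scrut_eq chain s c hlast hc]
    have hnext : words.filter (fun w => PySem.Str.startswith w (String.ofList [c]) && !(chain.contains w))
        = (words.filter (fun x => !(chain.contains x))).filter
            (fun w => PySem.Str.startswith w (String.ofList [c])) := by
      rw [List.filter_filter]
    rw [hnext]
    set remaining := words.filter (fun x => !(chain.contains x)) with hrem_def
    set chs := String.ofList [c] with hchs_def
    by_cases hempty : remaining.filter (fun w => PySem.Str.startswith w chs) = []
    · rw [if_pos hempty, longestExt_plain, PySem.List.foldl_if_eq_foldl_filter, hempty]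
      simp
    · rw [if_neg hempty]
      set g : String → Int := fun w =>
        match PySem.Str.pyGet? w (-1) with
        | none => 1
        | some cw => 1 + longestExt (remaining.filter (fun x => x ≠ w)) (String.ofList [cw])
        with hg_def
      -- facts about w in the next-word list
      have hw_facts : ∀ w ∈ remaining.filter (fun w => PySem.Str.startswith w chs),
          ∃ cw, PySem.Str.pyGet? w (-1) = some cw ∧
            word_chain_len words (chain ++ [w])
              = ((chain.length : Int) + 1) + longestExt (remaining.filter (fun x => x ≠ w)) (String.ofList [cw]) := by
        intro w hw
        rw [List.mem_filter] at hw
        obtain ⟨hw1, hP⟩ := hw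
        rw [hrem_def, List.mem_filter] at hw1
        obtain ⟨hwords, hnc⟩ := hw1
        have hpre : [c] <+: w.toList := by
          rw [PySem.Str.startswith_eq] at hP
          have h2 := (PySem.Chars.startswith_iff w.toList chs.toList).mp hP
          simpa [hchs_def] using h2
        have hne : w.toList ≠ [] := by
          intro h0
          rw [h0] at hpre
          exact absurd (List.prefix_nil.mp hpre) (by simp)
        obtain ⟨cw, hcw⟩ : ∃ cw, w.toList.getLast? = some cw := by
          cases h0 : w.toList.getLast? with
          | none => exact absurd (List.getLast?_eq_none_iff.mp h0) hne
          | some cw => exact ⟨cw, rfl⟩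
        have hget : PySem.Str.pyGet? w (-1) = some cw := by
          rw [PySem.Str.pyGet?_eq]
          simp [PySem.Chars.pyGet?, PySem.List.pyGet?_neg_one, hcw]
        have hlast' : (chain ++ [w]).getLast? = some w := by simp
        have hmeas : (words.filter (fun x => !((chain ++ [w]).contains x))).length ≤ n := by
          have hlt := pv_filter_append_lt words chain w hwords (by simpa using hnc)
          rw [← hrem_def] at hlt
          omega
        have hIH := ih words (chain ++ [w]) w cw hmeas hlast' hcw
        rw [← pv_remaining_step words chain w, ← hrem_def] at hIH
        refine ⟨cw, hget, ?_⟩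
        rw [hIH]
        congr 1
        simp [List.length_append]
      have hgpos : ∀ w ∈ remaining.filter (fun w => PySem.Str.startswith w chs), 1 ≤ g w := by
        intro w hw
        obtain ⟨cw, hget, _⟩ := hw_facts w hw
        rw [hg_def]
        simp only [hget]
        have := longestExt_nonneg (remaining.filter (fun x => x ≠ w)) (String.ofList [cw])
        omega
      -- B side: unfold to a plain fold over the next-word list
      rw [longestExt_plain, PySem.List.foldl_if_eq_foldl_filter]
      -- A side: remove attach, rewrite the body via the induction hypothesis
      rw [List.foldl_attach (l := remaining.filter (fun w => PySem.Str.startswith w chs)) (b := (0 : Int))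
            (f := fun mx w => let cl := word_chain_len words (chain ++ [w]); if cl > mx then cl else mx)]
      rw [PySem.List.foldl_congr_mem (remaining.filter (fun w => PySem.Str.startswith w chs))
            (fun mx w => let cl := word_chain_len words (chain ++ [w]); if cl > mx then cl else mx)
            (fun mx w => if (chain.length : Int) + g w > mx then (chain.length : Int) + g w else mx) 0 ?_]
      · rw [PySem.List.foldl_congr_mem (remaining.filter (fun w => PySem.Str.startswith w chs))
              (fun best w =>
                match PySem.Str.pyGet? w (-1) with
                | none => best
                | some cw =>
                  let ext := 1 + longestExt (remaining.filter (fun x => x ≠ w)) (String.ofList [cw])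
                  if ext > best then ext else best)
              (fun best w => if g w > best then g w else best) 0 ?_]
        · exact pv_fold_shift g (chain.length : Int) (Int.natCast_nonneg _) _ hempty hgpos
        · intro best w hw
          obtain ⟨cw, hget, -⟩ := hw_facts w hw
          rw [hg_def]
          simp only [hget]
      · intro mx w hw
        obtain ⟨cw, hget, hval⟩ := hw_facts w hw
        rw [hg_def]
        simp only [hval, hget]
        have harith : (chain.length : Int) + 1 + longestExt (remaining.filter (fun x => x ≠ w)) (String.ofList [cw])
            = (chain.length : Int) + (1 + longestExt (remaining.filter (fun x => x ≠ w)) (String.ofList [cw])) := by ring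
        rw [harith]

theorem word_chain_len_spec : Claim_equal_word_chain_len := by
  intro words chain _ hpre
  unfold Spec_word_chain_len
  obtain ⟨h1, h2⟩ := hpre
  cases hlast : chain.getLast? with
  | none => exact absurd hlast h1
  | some s =>
    have hs : s.toList ≠ [] := by
      intro h
      apply h2
      rw [hlast]
      have h3 : s = "" := by
        have h4 := congrArg String.ofList h
        simpa using h4
      rw [h3]
    obtain ⟨c, hc⟩ : ∃ c, s.toList.getLast? = some c := by
      cases h : s.toList.getLast? with
      | none => exact absurd (List.getLast?_eq_none_iff.mp h) hs
      | some c => exact ⟨c, rfl⟩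
    rw [pv_key (words.filter (fun x => !(chain.contains x))).length words chain s c le_rfl hlast hc]
    rw [word_chain_len_alt]
    rw [pv_scrut_eq chain s c hlast hc]
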